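-- pv_equiv track=rewrite | github.com/MikeDominic92/Predictive-Threat-Intelligence-Platform-for-Cloud-Vulnerabilities | src/functions/data_processing/normalizers/virustotal.py | map_vt_category
-- ===== SOURCE A (Python) =====
-- def map_vt_category(malicious_count, suspicious_count, harmless_count, attributes):
--     """Attempt to determine a primary threat category from VT results."""
--     if malicious_count > 0:
--         # Look for specific categories in engine results (more reliable than tags)
--         categories = set()
--         for engine, result in attributes.get("last_analysis_results", {}).items():
--             cat = result.get("category")
--             if cat and cat != "undetected" and cat != "harmless" and cat != "timeout":
--                  categories.add(cat.lower())
--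
--         if "malware" in categories: return "malware"
--         if "phishing" in categories: return "phishing"
--         if "suspicious" in categories and malicious_count > suspicious_count:
--              # If more malicious than suspicious, lean towards a stronger category if possible
--              # Try mapping based on engine names or results if needed here
--              pass # Placeholder for more detailed mapping
--         if categories: # Return the most common/important if multiple exist
--              return sorted(list(categories))[0] # Simple alphabetical sort for now
--
--         return "malicious_generic" # Fallback if only malicious count is positive
--
--     if suspicious_count > 0:
--         return "suspicious_generic"
--     if harmless_count > 0:
--         return "benign"
--
--     return "unknown"
-- ===== SOURCE B (Python) =====
-- def map_vt_category(malicious_count, suspicious_count, harmless_count, attributes):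
--     """Single-pass classification: flags plus a running alphabetical minimum,
--     instead of building a set and sorting it."""
--     if malicious_count > 0:
--         saw_malware = False
--         saw_phishing = False
--         best = None
--         for result in attributes.get("last_analysis_results", {}).values():
--             cat = result.get("category")
--             if cat and cat not in ("undetected", "harmless", "timeout"):
--                 c = cat.lower()
--                 if c == "malware":
--                     saw_malware = True
--                 elif c == "phishing":
--                     saw_phishing = True
--                 if best is None or c < best:
--                     best = c
--         if saw_malware:
--             return "malware"
--         if saw_phishing:
--             return "phishing"
--         if best is not None:
--             return best
--         return "malicious_generic"
--     if suspicious_count > 0: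
--         return "suspicious_generic"
--     if harmless_count > 0:
--         return "benign"
--     return "unknown"
-- ===== Notes on version B (the rewrite author's own statement) =====
-- stated objective: simpler
-- what changed: Replaces A's build-a-set-then-membership-test-then-sort-and-index pipeline by one pass over the engine results that keeps two flags and a running alphabetical minimum, so no set and no sort are needed.
import Mathlib
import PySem

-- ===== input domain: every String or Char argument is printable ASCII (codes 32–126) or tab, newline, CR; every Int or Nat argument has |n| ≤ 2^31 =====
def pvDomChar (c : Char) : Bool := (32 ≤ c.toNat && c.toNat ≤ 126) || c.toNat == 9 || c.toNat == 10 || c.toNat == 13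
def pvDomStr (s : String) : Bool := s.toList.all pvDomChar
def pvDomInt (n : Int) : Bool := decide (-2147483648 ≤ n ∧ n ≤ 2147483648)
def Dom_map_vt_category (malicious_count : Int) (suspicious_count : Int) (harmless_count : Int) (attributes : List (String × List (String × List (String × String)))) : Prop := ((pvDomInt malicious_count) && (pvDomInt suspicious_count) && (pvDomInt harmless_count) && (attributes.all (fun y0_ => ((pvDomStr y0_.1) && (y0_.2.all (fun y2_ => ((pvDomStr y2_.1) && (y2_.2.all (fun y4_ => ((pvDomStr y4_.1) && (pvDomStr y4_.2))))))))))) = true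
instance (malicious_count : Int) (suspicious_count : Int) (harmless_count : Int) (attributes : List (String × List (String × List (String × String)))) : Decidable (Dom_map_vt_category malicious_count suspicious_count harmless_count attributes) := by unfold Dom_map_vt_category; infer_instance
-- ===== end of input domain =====

-- B replaces A's build-a-set / membership-test / sort-and-index pipeline by a single pass
-- keeping two flags and a running alphabetical minimum (objective: simpler; return value only).

-- ===== PORT A =====
def map_vt_category (malicious_count : Int) (suspicious_count : Int) (harmless_count : Int) (attributes : List (String × List (String × List (String × String)))) : String :=
  if malicious_count > 0 then
    let categories : PySem.Set String :=
      (PySem.Dict.ofList ((PySem.Dict.ofList attributes).getD "last_analysis_results" [])).items.foldl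
        (fun cats p =>
          match (PySem.Dict.ofList p.2).get? "category" with
          | some cat =>
            if cat ≠ "" ∧ cat ≠ "undetected" ∧ cat ≠ "harmless" ∧ cat ≠ "timeout" then
              PySem.Set.add cats (PySem.Str.lower cat)
            else cats
          | none => cats)
        PySem.Set.empty
    if PySem.Set.contains categories "malware" then "malware"
    else if PySem.Set.contains categories "phishing" then "phishing"
    -- (A's 'suspicious' branch is a `pass` and has no effect)
    else if categories ≠ [] then
      PySem.List.pyGetD (PySem.List.sorted categories (fun x => x) false) 0 ""
    else "malicious_generic"
  else if suspicious_count > 0 then "suspicious_generic"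
  else if harmless_count > 0 then "benign"
  else "unknown"

-- ===== PORT B =====
def map_vt_category_alt (malicious_count : Int) (suspicious_count : Int) (harmless_count : Int) (attributes : List (String × List (String × List (String × String)))) : String :=
  if malicious_count > 0 then
    let st : Bool × Bool × Option String :=
      (PySem.Dict.ofList ((PySem.Dict.ofList attributes).getD "last_analysis_results" [])).values.foldl
        (fun st result =>
          match (PySem.Dict.ofList result).get? "category" with
          | some cat =>
            if cat ≠ "" ∧ ¬(cat = "undetected" ∨ cat = "harmless" ∨ cat = "timeout") then
              let c := PySem.Str.lower cat
              let b := match st.2.2 with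
                | none => some c
                | some b0 => if c < b0 then some c else some b0
              if c = "malware" then (true, st.2.1, b)
              else if c = "phishing" then (st.1, true, b)
              else (st.1, st.2.1, b)
            else st
          | none => st)
        (false, false, none)
    if st.1 then "malware"
    else if st.2.1 then "phishing"
    else match st.2.2 with
      | some best => best
      | none => "malicious_generic"
  else if suspicious_count > 0 then "suspicious_generic"
  else if harmless_count > 0 then "benign"
  else "unknown"

-- ===== PRECONDITION & SPEC =====
def Spec_map_vt_category (malicious_count : Int) (suspicious_count : Int) (harmless_count : Int) (attributes : List (String × List (String × List (String × String)))) (out : String) : Prop := out = map_vt_category_alt malicious_count suspicious_count harmless_count attributes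
instance (malicious_count : Int) (suspicious_count : Int) (harmless_count : Int) (attributes : List (String × List (String × List (String × String)))) (out : String) : Decidable (Spec_map_vt_category malicious_count suspicious_count harmless_count attributes out) := by unfold Spec_map_vt_category; infer_instance

-- ===== CLAIM (what is proved, stated in full; the proofs are below) =====
def Claim_equal_map_vt_category : Prop := ∀ (malicious_count : Int) (suspicious_count : Int) (harmless_count : Int) (attributes : List (String × List (String × List (String × String)))), Dom_map_vt_category malicious_count suspicious_count harmless_count attributes → Spec_map_vt_category malicious_count suspicious_count harmless_count attributes (map_vt_category malicious_count suspicious_count harmless_count attributes)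

-- ===== LEMMAS AND PROOFS =====

-- the lowered category an engine result contributes, if any (A's and B's filter rule)
def pvG (result : List (String × String)) : Option String :=
  match (PySem.Dict.ofList result).get? "category" with
  | some cat =>
    if cat ≠ "" ∧ cat ≠ "undetected" ∧ cat ≠ "harmless" ∧ cat ≠ "timeout" then
      some (PySem.Str.lower cat)
    else none
  | none => none

-- B's per-category accumulator step
def pvStepC (st : Bool × Bool × Option String) (c : String) : Bool × Bool × Option String :=
  let b := match st.2.2 with
    | none => some c
    | some b0 => if c < b0 then some c else some b0
  if c = "malware" then (true, st.2.1, b)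
  else if c = "phishing" then (st.1, true, b)
  else (st.1, st.2.1, b)

-- B's running-minimum component
def pvMin (b : Option String) (cats : List String) : Option String :=
  cats.foldl (fun b? c => match b? with
    | none => some c
    | some b0 => if c < b0 then some c else some b0) b

lemma pv_afold (items : List (String × List (String × String))) (acc : PySem.Set String) :
    items.foldl
      (fun cats p =>
        match (PySem.Dict.ofList p.2).get? "category" with
        | some cat =>
          if cat ≠ "" ∧ cat ≠ "undetected" ∧ cat ≠ "harmless" ∧ cat ≠ "timeout" then
            PySem.Set.add cats (PySem.Str.lower cat)
          else cats
        | none => cats) acc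
    = ((items.map (·.2)).filterMap pvG).foldl PySem.Set.add acc := by
  rw [List.foldl_filterMap, List.foldl_map]
  congr 1
  funext cs p
  simp only [pvG]
  cases (PySem.Dict.ofList p.2).get? "category" with
  | none => rfl
  | some cat =>
    by_cases hc : cat ≠ "" ∧ cat ≠ "undetected" ∧ cat ≠ "harmless" ∧ cat ≠ "timeout"
    · simp [hc]
    · simp [hc]

lemma pv_bfold (vs : List (List (String × String))) (st : Bool × Bool × Option String) :
    vs.foldl
      (fun st result =>
        match (PySem.Dict.ofList result).get? "category" with
        | some cat =>
          if cat ≠ "" ∧ ¬(cat = "undetected" ∨ cat = "harmless" ∨ cat = "timeout") then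
            let c := PySem.Str.lower cat
            let b := match st.2.2 with
              | none => some c
              | some b0 => if c < b0 then some c else some b0
            if c = "malware" then (true, st.2.1, b)
            else if c = "phishing" then (st.1, true, b)
            else (st.1, st.2.1, b)
          else st
        | none => st) st
    = (vs.filterMap pvG).foldl pvStepC st := by
  rw [List.foldl_filterMap]
  congr 1
  funext st r
  simp only [pvG]
  cases (PySem.Dict.ofList r).get? "category" with
  | none => rfl
  | some cat =>
    by_cases hc : cat ≠ "" ∧ cat ≠ "undetected" ∧ cat ≠ "harmless" ∧ cat ≠ "timeout"
    · obtain ⟨h1, h2, h3, h4⟩ := hc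
      simp [h1, h2, h3, h4, pvStepC]
    · have hB : ¬(cat ≠ "" ∧ ¬(cat = "undetected" ∨ cat = "harmless" ∨ cat = "timeout")) := by tauto
      simp only [if_neg hB, if_neg hc]

lemma pv_cfold (cats : List String) (sm sp : Bool) (b : Option String) :
    cats.foldl pvStepC (sm, sp, b)
      = (sm || cats.contains "malware", sp || cats.contains "phishing", pvMin b cats) := by
  induction cats generalizing sm sp b with
  | nil => simp [pvMin]
  | cons c t ih =>
    simp only [List.foldl_cons]
    have hstep : pvStepC (sm, sp, b) c
        = (sm || (c == "malware"), sp || (c == "phishing"),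
           pvMin b [c]) := by
      simp only [pvStepC, pvMin, List.foldl_cons, List.foldl_nil]
      by_cases h1 : c = "malware"
      · subst h1; simp
      · by_cases h2 : c = "phishing"
        · subst h2; simp
        · simp [h1, h2]
    rw [hstep, ih]
    simp only [pvMin, List.foldl_cons, List.foldl_nil, List.contains_cons, Prod.mk.injEq]
    refine ⟨?_, ?_, trivial⟩
    · by_cases h1 : c = "malware" <;> simp [h1, BEq.comm, Bool.or_assoc]
    · by_cases h2 : c = "phishing" <;> simp [h2, BEq.comm, Bool.or_assoc]

lemma pv_pvMin_some (t : List String) (b : String) :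
    pvMin (some b) t = some (t.foldl min b) := by
  induction t generalizing b with
  | nil => rfl
  | cons c t ih =>
    simp only [pvMin, List.foldl_cons] at *
    have : (if c < b then some c else some b) = some (min b c) := by
      rcases lt_or_ge c b with h | h
      · simp [h, min_eq_right h.le]
      · simp [not_lt.mpr h, min_eq_left h]
    rw [this, ih]

lemma pv_pvMin_cons (c : String) (t : List String) :
    pvMin none (c :: t) = some (t.foldl min c) := by
  simp only [pvMin, List.foldl_cons]
  exact pv_pvMin_some t c

-- head of sorted(set(cats)) is the running minimum of cats
lemma pv_sorted_head (c : String) (t : List String) :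
    PySem.List.pyGetD (PySem.List.sorted (PySem.Set.ofList (c :: t)) (fun x => x) false) 0 ""
      = t.foldl min c := by
  have hne : PySem.List.sorted (PySem.Set.ofList (c :: t)) (fun x => x) false ≠ [] := by
    intro h
    rw [PySem.List.sorted_eq_nil_iff] at h
    have : c ∈ PySem.Set.ofList (c :: t) := (PySem.Set.mem_ofList _ _).mpr (by simp)
    simp [h] at this
  obtain ⟨m, r, hsr⟩ := List.exists_cons_of_ne_nil hne
  rw [hsr, PySem.List.pyGetD_zero_cons]
  have hmin_le : ∀ y ∈ (c :: t), t.foldl min c ≤ y := by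
    intro y hy
    rcases List.mem_cons.mp hy with rfl | h
    · exact (PySem.List.foldl_min_le t _).1
    · exact (PySem.List.foldl_min_le t c).2 y h
  have hmin_mem : t.foldl min c ∈ (c :: t) := by
    rcases PySem.List.foldl_min_mem t c with h | h
    · rw [h]; exact List.mem_cons_self ..
    · exact List.mem_cons_of_mem _ h
  have hm_mem : m ∈ (c :: t) := by
    have : m ∈ PySem.List.sorted (PySem.Set.ofList (c :: t)) (fun x => x) false := by
      rw [hsr]; exact List.mem_cons_self ..
    exact (PySem.Set.mem_ofList _ _).mp ((PySem.List.mem_sorted _ _ _ _).mp this)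
  have hm_le : ∀ y ∈ (c :: t), m ≤ y := by
    intro y hy
    exact PySem.List.key_head_sorted_le _ (fun x => x) hsr y
      ((PySem.Set.mem_ofList _ _).mpr hy)
  exact le_antisymm (hm_le _ hmin_mem) (hmin_le _ hm_mem)

lemma pv_contains_iff (cats : List String) (x : String) :
    PySem.Set.contains (PySem.Set.ofList cats) x = cats.contains x := by
  simp only [PySem.Set.contains]
  by_cases h : x ∈ cats
  · rw [List.contains_iff_mem.mpr ((PySem.Set.mem_ofList cats x).mpr h),
       List.contains_iff_mem.mpr h]
  · rw [Bool.eq_false_iff.mpr (fun hx => h ((PySem.Set.mem_ofList cats x).mp (List.contains_iff_mem.mp hx))),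
       Bool.eq_false_iff.mpr (fun hx => h (List.contains_iff_mem.mp hx))]

-- ===== VERDICT (by name: the statement is the Claim_ definition above) =====
theorem map_vt_category_spec : Claim_equal_map_vt_category := by
  intro malicious_count suspicious_count harmless_count attributes _
  unfold Spec_map_vt_category map_vt_category map_vt_category_alt
  by_cases hm : malicious_count > 0
  · rw [if_pos hm, if_pos hm]
    simp only [PySem.Dict.values]
    rw [pv_afold, pv_bfold]
    simp only [PySem.Set.empty]
    rw [← PySem.Set.ofList_eq_foldl]
    set cats := (((PySem.Dict.ofList ((PySem.Dict.ofList attributes).getD "last_analysis_results" [])).items.map (·.2)).filterMap pvG) with hcats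
    rw [pv_cfold, pv_contains_iff, pv_contains_iff]
    simp only [Bool.false_or]
    by_cases hmal : cats.contains "malware"
    · rw [if_pos hmal, if_pos hmal]
    · rw [if_neg hmal, if_neg hmal]
      by_cases hphi : cats.contains "phishing"
      · rw [if_pos hphi, if_pos hphi]
      · rw [if_neg hphi, if_neg hphi]
        cases hc : cats with
        | nil =>
          rw [if_neg (by simp [PySem.Set.ofList])]
          simp [pvMin]
        | cons c t =>
          rw [if_pos (by
            intro h
            have : c ∈ PySem.Set.ofList (c :: t) := (PySem.Set.mem_ofList _ _).mpr (by simp)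
            simp [h] at this)]
          rw [pv_sorted_head]
          simp [pv_pvMin_cons]
  · rw [if_neg hm, if_neg hm]
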